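-- pv_equiv track=rewrite | github.com/jyooj08/Problem-Solving | programmers/조이스틱.py | maxLeft
-- ===== SOURCE A (Python) =====
-- def maxLeft(cur, n, visited):
--     cur_len, max_len = 0, 0
--     idx = cur - 1
--     if idx < 0: idx = n - 1
--     while idx != cur:
--         cur_len += 1
--         if visited[idx] == False:
--             max_len = cur_len
--         idx -= 1
--         if idx < 0: idx = n - 1
--
--     return max_len
-- ===== SOURCE B (Python) =====
-- def maxLeft(cur, n, visited):
--     # Closed-form leftward distance on the ring of n positions: normalize the
--     # pointer into the ring, then for each index i the distance walking left
--     # (with wrap) from cur to i is (cur - i) % n; take the maximum over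
--     # unvisited indices other than cur.
--     cur = cur % n
--     best = 0
--     for i in range(n):
--         if i != cur and visited[i] == False:
--             d = (cur - i) % n
--             if d > best:
--                 best = d
--     return best
-- ===== Notes on version B (the rewrite author's own statement) =====
-- stated objective: simpler
-- what changed: Replaced A's simulated leftward walk with wraparound index bookkeeping by a single forward scan over the ring that computes each index's leftward distance in closed form as (cur - i) % n and takes the maximum.
-- outside the precondition, e.g. on maxLeft(-1, 0, []): A returns 0, B raises ZeroDivisionError
import Mathlib
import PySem

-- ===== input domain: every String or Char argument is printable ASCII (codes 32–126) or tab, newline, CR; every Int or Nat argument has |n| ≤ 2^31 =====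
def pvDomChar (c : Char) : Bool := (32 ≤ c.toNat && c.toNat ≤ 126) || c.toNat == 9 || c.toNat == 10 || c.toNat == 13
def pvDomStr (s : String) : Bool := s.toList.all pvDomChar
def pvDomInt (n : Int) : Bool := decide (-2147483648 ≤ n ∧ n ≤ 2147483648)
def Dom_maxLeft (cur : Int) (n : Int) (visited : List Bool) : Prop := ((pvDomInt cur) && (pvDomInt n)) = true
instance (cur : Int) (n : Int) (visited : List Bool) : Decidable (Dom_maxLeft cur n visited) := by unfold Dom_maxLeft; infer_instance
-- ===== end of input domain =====

-- B replaces A's simulated wrapped leftward walk by a forward scan with the closed-form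
-- leftward distance (cur - i) % n; same return value on Pre_ (simpler decomposition, not faster).

-- ===== PORT A =====
-- the while loop of A: state (idx, cur_len, max_len); fuel only makes the recursion total,
-- on Pre_ the loop exits by the idx = cur test before fuel runs out
def maxLeftLoop (cur n : Int) (visited : List Bool) : Nat → Int → Int → Int → Int
  | 0, _, _, maxLen => maxLen
  | fuel+1, idx, curLen, maxLen =>
    if idx = cur then maxLen
    else
      let curLen' := curLen + 1
      let maxLen' := if (PySem.List.pyGet? visited idx).getD true = false then curLen' else maxLen
      let idx' := idx - 1
      maxLeftLoop cur n visited fuel (if idx' < 0 then n - 1 else idx') curLen' maxLen'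

def maxLeft (cur : Int) (n : Int) (visited : List Bool) : Int :=
  let idx := cur - 1
  let idx := if idx < 0 then n - 1 else idx
  maxLeftLoop cur n visited n.toNat idx 0 0

-- ===== PORT B =====
def maxLeft_alt (cur : Int) (n : Int) (visited : List Bool) : Int :=
  let cur := PySem.Int.mod cur n
  (PySem.List.pyRange 0 n 1).foldl (fun best i =>
    if i ≠ cur ∧ (PySem.List.pyGet? visited i).getD true = false then
      let d := PySem.Int.mod (cur - i) n
      if d > best then d else best
    else best) 0

-- ===== PRECONDITION & SPEC =====
-- Pre_: where the Python A returns: either 0 ≤ cur < n with every index the walk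
-- reads inside visited (all of 0..n-1 except cur itself; otherwise IndexError), or the
-- degenerate cur = n - 1 with n < 0 where the walk exits immediately; on all other inputs
-- A loops forever (the walk never reaches cur) or raises IndexError.
-- Pre_ excludes the single corner cur = -1, n = 0 (A returns 0 there, but B's ring
-- normalization cur % n raises ZeroDivisionError on n = 0).
def Pre_maxLeft (cur : Int) (n : Int) (visited : List Bool) : Prop :=
  (0 ≤ cur ∧ cur < n ∧
    ((n : Int) ≤ (visited.length : Int) ∨ (cur = n - 1 ∧ n - 1 ≤ (visited.length : Int))))
  ∨ (cur = n - 1 ∧ n < 0)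
instance (cur : Int) (n : Int) (visited : List Bool) : Decidable (Pre_maxLeft cur n visited) := by
  unfold Pre_maxLeft; infer_instance

def pvWitness_maxLeft : Int × Int × List Bool := (1, 3, [false, true, false])

def Spec_maxLeft (cur : Int) (n : Int) (visited : List Bool) (out : Int) : Prop := out = maxLeft_alt cur n visited
instance (cur : Int) (n : Int) (visited : List Bool) (out : Int) : Decidable (Spec_maxLeft cur n visited out) := by unfold Spec_maxLeft; infer_instance

-- ===== CLAIM (what is proved, stated in full; the proofs are below) =====
def Claim_equal_maxLeft : Prop := ∀ (cur : Int) (n : Int) (visited : List Bool), Dom_maxLeft cur n visited → Pre_maxLeft cur n visited → Spec_maxLeft cur n visited (maxLeft cur n visited)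

-- ===== LEMMAS AND PROOFS =====

-- small modular-arithmetic helpers (Int.emod, divisor positive)
lemma emod_small (a n : Int) (h0 : 0 ≤ a) (h1 : a < n) : a % n = a :=
  Int.emod_eq_of_lt h0 h1

lemma emod_neg_small (a n : Int) (h0 : -n ≤ a) (h1 : a < 0) : a % n = a + n := by
  have h2 : (a + n) % n = a % n := by
    simp [show a + n = a + n * 1 by ring, Int.add_mul_emod_self_left]
  rw [← h2, emod_small (a + n) n (by omega) (by omega)]

lemma dvd_bounded {n a : Int} (_hn : 0 < n) (hd : n ∣ a) (h1 : -n < a) (h2 : a < n) : a = 0 := by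
  obtain ⟨k, hk⟩ := hd
  subst hk
  rcases lt_trichotomy k 0 with h | h | h
  · nlinarith
  · simp [h]
  · nlinarith

lemma emod_cong {a b n : Int} (_hn : 0 < n) (h : n ∣ (a - b)) : a % n = b % n := by
  obtain ⟨k, hk⟩ := h
  have : a = b + n * k := by omega
  subst this
  simp [Int.add_mul_emod_self_left]

lemma emod_eq_emod_dvd {a b n : Int} (h : a % n = b % n) : n ∣ (a - b) :=
  Int.dvd_of_emod_eq_zero (Int.emod_eq_emod_iff_emod_sub_eq_zero.mp h)

-- fold of "keep the last qualifying element" over a strictly increasing list starting below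
-- all elements equals fold of max over the qualifying elements
lemma foldl_replace (c : Int → Prop) [DecidablePred c] :
    ∀ (l : List Int) (m : Int), l.Pairwise (· < ·) → (∀ x ∈ l, m ≤ x) →
      l.foldl (fun acc d => if c d then d else acc) m
        = (l.filter (fun d => decide (c d))).foldl (fun b x => if x > b then x else b) m := by
  intro l
  induction l with
  | nil => intro m _ _; rfl
  | cons a l ih =>
    intro m hp hm
    have ha : m ≤ a := hm a (by simp)
    have hlt : ∀ x ∈ l, a < x := (List.pairwise_cons.mp hp).1
    have htl : l.Pairwise (· < ·) := (List.pairwise_cons.mp hp).2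
    by_cases h : c a
    · rw [List.foldl_cons, if_pos h, List.filter_cons_of_pos (by simp [h]), List.foldl_cons]
      have hmax : (if a > m then a else m) = a := by split <;> omega
      rw [hmax]
      exact ih a htl (fun x hx => le_of_lt (hlt x hx))
    · rw [List.foldl_cons, if_neg h, List.filter_cons_of_neg (by simp [h])]
      exact ih m htl (fun x hx => hm x (by simp [hx]))

-- fold of conditional max equals fold of max over the mapped filtered list
lemma foldl_condmax (c : Int → Prop) [DecidablePred c] (g : Int → Int) :
    ∀ (l : List Int) (m : Int),
      l.foldl (fun best i => if c i then (if g i > best then g i else best) else best) m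
        = ((l.filter (fun i => decide (c i))).map g).foldl (fun b x => if x > b then x else b) m := by
  intro l
  induction l with
  | nil => intro m; rfl
  | cons a l ih =>
    intro m
    by_cases h : c a
    · rw [List.foldl_cons, if_pos h, List.filter_cons_of_pos (by simp [h]), List.map_cons,
        List.foldl_cons]
      exact ih _
    · rw [List.foldl_cons, if_neg h, List.filter_cons_of_neg (by simp [h])]
      exact ih m

-- A's loop, started in the state reached after t iterations, computes the
-- "keep the last qualifying distance" fold over the remaining distances t+1 .. n-1
lemma loopA_spec (cur n : Int) (visited : List Bool) (h0 : 0 ≤ cur) (h1 : cur < n) :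
    ∀ (r : Nat) (t maxLen : Int), 0 ≤ t → t + r = n - 1 →
      maxLeftLoop cur n visited (r+1) ((cur - 1 - t) % n) t maxLen
        = (PySem.List.pyRange (t+1) n 1).foldl
            (fun m d => if (PySem.List.pyGet? visited ((cur - d) % n)).getD true = false then d else m)
            maxLen := by
  intro r
  induction r with
  | zero =>
    intro t maxLen ht hsum
    have htn : t = n - 1 := by omega
    subst htn
    have hidx : (cur - 1 - (n - 1)) % n = cur := by
      have h : cur - 1 - (n - 1) = cur - n := by ring
      rw [h, Int.sub_emod_right, emod_small cur n h0 h1]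
    rw [hidx]
    simp [maxLeftLoop]
  | succ r ih =>
    intro t maxLen ht hsum
    have hn2 : 2 ≤ n := by omega
    have hx0 : 0 ≤ (cur - 1 - t) % n := Int.emod_nonneg _ (by omega)
    have hxn : (cur - 1 - t) % n < n := Int.emod_lt_of_pos _ (by omega)
    have hne : (cur - 1 - t) % n ≠ cur := by
      intro he
      have hd : n ∣ (cur - 1 - t - cur) := by
        have : (cur - 1 - t) % n = cur % n := by rw [he, emod_small cur n h0 h1]
        exact emod_eq_emod_dvd this
      have : cur - 1 - t - cur = -(1 + t) := by ring
      rw [this] at hd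
      have := dvd_bounded (by omega : (0:Int) < n) hd (by omega) (by omega)
      omega
    rw [maxLeftLoop, if_neg hne]
    dsimp only
    have hstep : (if (cur - 1 - t) % n - 1 < 0 then n - 1 else (cur - 1 - t) % n - 1)
        = (cur - 1 - (t+1)) % n := by
      have hc : (cur - 1 - (t+1)) % n = ((cur - 1 - t) % n - 1) % n := by
        apply emod_cong (by omega)
        refine ⟨(cur - 1 - t) / n, ?_⟩
        have h := Int.emod_add_mul_ediv (cur - 1 - t) n
        linarith
      by_cases hz : (cur - 1 - t) % n - 1 < 0
      · rw [if_pos hz, hc, emod_neg_small ((cur - 1 - t) % n - 1) n (by omega) (by omega)]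
        omega
      · rw [if_neg hz, hc, emod_small ((cur - 1 - t) % n - 1) n (by omega) (by omega)]
    rw [hstep]
    have := ih (t+1) (if (PySem.List.pyGet? visited ((cur - 1 - t) % n)).getD true = false then t + 1 else maxLen) (by omega) (by omega)
    rw [this]
    have hrange : PySem.List.pyRange (t+1) n 1 = (t+1) :: PySem.List.pyRange (t+1+1) n 1 := by
      have := PySem.List.pyRange_one_cons (a := t+1) (b := n) (by omega)
      simpa using this
    rw [hrange]
    simp only [List.foldl_cons]
    have harg : cur - (t+1) = cur - 1 - t := by ring
    rw [harg]

-- membership/nodup facts for the two qualifying lists, and the permutation between them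
lemma perm_lists (cur n : Int) (visited : List Bool) (h0 : 0 ≤ cur) (h1 : cur < n) :
    (((PySem.List.pyRange 0 n 1).filter
        (fun i => decide (i ≠ cur ∧ (PySem.List.pyGet? visited i).getD true = false))).map
      (fun i => (cur - i) % n)).Perm
    ((PySem.List.pyRange 1 n 1).filter
      (fun d => decide ((PySem.List.pyGet? visited ((cur - d) % n)).getD true = false))) := by
  have hn : (0:Int) < n := by omega
  refine (List.perm_ext_iff_of_nodup ?_ ?_).mpr ?_
  · refine List.Nodup.map_on ?_ (List.Nodup.filter _ (PySem.List.nodup_pyRange_one _ _))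
    intro i hi j hj hij
    have hi' := (List.mem_filter.mp hi).1
    have hj' := (List.mem_filter.mp hj).1
    rw [PySem.List.mem_pyRange_one] at hi' hj'
    have hd := emod_eq_emod_dvd hij
    have he : cur - i - (cur - j) = j - i := by ring
    rw [he] at hd
    have := dvd_bounded hn hd (by omega) (by omega)
    omega
  · exact List.Nodup.filter _ (PySem.List.nodup_pyRange_one _ _)
  · intro a
    simp only [List.mem_map, List.mem_filter, PySem.List.mem_pyRange_one, decide_eq_true_eq]
    constructor
    · rintro ⟨i, ⟨⟨hi0, hin⟩, hic, hiv⟩, rfl⟩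
      have ha0 : 0 ≤ (cur - i) % n := Int.emod_nonneg _ (by omega)
      have han : (cur - i) % n < n := Int.emod_lt_of_pos _ hn
      have hane : (cur - i) % n ≠ 0 := by
        intro h
        have hd : n ∣ (cur - i) := Int.dvd_of_emod_eq_zero h
        have := dvd_bounded hn hd (by omega) (by omega)
        exact hic (by omega)
      refine ⟨⟨by omega, han⟩, ?_⟩
      have hback : (cur - (cur - i) % n) % n = i := by
        have h1 : (cur - (cur - i) % n) % n = (cur - (cur - i)) % n := by
          apply emod_cong hn
          refine ⟨(cur - i) / n, ?_⟩
          have h := Int.emod_add_mul_ediv (cur - i) n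
          linarith
        have h2 : cur - (cur - i) = i := by ring
        rw [h1, h2, emod_small i n hi0 hin]
      rw [hback]
      exact hiv
    · rintro ⟨⟨ha1, han⟩, hv⟩
      have hi0 : 0 ≤ (cur - a) % n := Int.emod_nonneg _ (by omega)
      have hin : (cur - a) % n < n := Int.emod_lt_of_pos _ hn
      have hic : (cur - a) % n ≠ cur := by
        intro h
        have hcc : (cur - a) % n = cur % n := by rw [h, emod_small cur n h0 h1]
        have hd := emod_eq_emod_dvd hcc
        have he : cur - a - cur = -a := by ring
        rw [he] at hd
        have := dvd_bounded hn hd (by omega) (by omega)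
        omega
      refine ⟨(cur - a) % n, ⟨⟨hi0, hin⟩, hic, hv⟩, ?_⟩
      have h1 : (cur - (cur - a) % n) % n = (cur - (cur - a)) % n := by
        apply emod_cong hn
        refine ⟨(cur - a) / n, ?_⟩
        have h := Int.emod_add_mul_ediv (cur - a) n
        linarith
      have h2 : cur - (cur - a) = a := by ring
      rw [h1, h2, emod_small a n (by omega) (by omega)]

theorem maxLeft_spec : Claim_equal_maxLeft := by
  intro cur n visited _ hpre
  unfold Spec_maxLeft
  rcases hpre with ⟨h0, h1, -⟩ | ⟨hc, hn0⟩
  case inr =>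
    -- n < 0 and cur = n - 1: A's walk exits immediately, B's range is empty; both return 0
    have ht : n.toNat = 0 := by omega
    have hr : PySem.List.pyRange 0 n 1 = [] := PySem.List.pyRange_one_eq_nil (by omega)
    simp [maxLeft, maxLeft_alt, ht, hr, maxLeftLoop]
  have hn : (0:Int) < n := by omega
  -- A: the loop computes the "last qualifying distance" fold over distances 1 .. n-1
  have hA : maxLeft cur n visited
      = (PySem.List.pyRange 1 n 1).foldl
          (fun m d => if (PySem.List.pyGet? visited ((cur - d) % n)).getD true = false then d else m) 0 := by
    unfold maxLeft
    dsimp only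
    have hfuel : n.toNat = (n-1).toNat + 1 := by omega
    have hidx : (if cur - 1 < 0 then n - 1 else cur - 1) = (cur - 1 - 0) % n := by
      have h : cur - 1 - 0 = cur - 1 := by ring
      by_cases hc : cur - 1 < 0
      · rw [if_pos hc, h, emod_neg_small (cur - 1) n (by omega) (by omega)]
        omega
      · rw [if_neg hc, h, emod_small (cur - 1) n (by omega) (by omega)]
    rw [hidx, hfuel]
    have := loopA_spec cur n visited h0 h1 (n-1).toNat 0 0 (by omega)
      (by omega : (0:Int) + ((n-1).toNat : Int) = n - 1)
    simpa using this
  have hrep := foldl_replace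
      (c := fun d => (PySem.List.pyGet? visited ((cur - d) % n)).getD true = false)
      (PySem.List.pyRange 1 n 1) 0 (PySem.List.pairwise_lt_pyRange_one _ _)
      (fun x hx => by rw [PySem.List.mem_pyRange_one] at hx; omega)
  -- B: the conditional-max fold equals the max fold over the mapped qualifying list
  have hB : maxLeft_alt cur n visited
      = (((PySem.List.pyRange 0 n 1).filter
            (fun i => decide (i ≠ cur ∧ (PySem.List.pyGet? visited i).getD true = false))).map
          (fun i => (cur - i) % n)).foldl (fun b x => if x > b then x else b) 0 := by
    unfold maxLeft_alt
    have hcn : PySem.Int.mod cur n = cur := by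
      rw [PySem.Int.mod_eq_emod_of_pos hn]; exact emod_small cur n h0 h1
    rw [hcn]
    have hmod : ∀ best i : Int,
        (if i ≠ cur ∧ (PySem.List.pyGet? visited i).getD true = false then
            (let d := PySem.Int.mod (cur - i) n; if d > best then d else best)
          else best)
        = (if i ≠ cur ∧ (PySem.List.pyGet? visited i).getD true = false then
            (if (cur - i) % n > best then (cur - i) % n else best)
          else best) := by
      intro best i
      rw [PySem.Int.mod_eq_emod_of_pos hn]
    simp only [hmod]
    exact foldl_condmax
      (c := fun i => i ≠ cur ∧ (PySem.List.pyGet? visited i).getD true = false)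
      (fun i => (cur - i) % n) _ 0
  rw [hA, hrep, hB]
  exact ((perm_lists cur n visited h0 h1).foldl_eq'
    (by intro x _ y _ z; split_ifs <;> omega) 0).symm
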